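-- pv_equiv track=rewrite | github.com/Zachary77-code/mtb | src/renderers/html_generator.py | _parse_timeline_items
-- ===== SOURCE A (Python) =====
-- from typing import Dict, Any, List
--
-- def _parse_timeline_items(content: str) -> List[Dict[str, str]]:
--     """
--     自定义时间线解析器（替代 yaml.safe_load）
--
--     逐行解析 YAML-like 时间线格式，避免 yaml.safe_load 在特殊值
--     （如 response: - 裸横杠、包含冒号的值）上的解析失败。
--
--     Args:
--         content: :::timeline 块内的文本
--
--     Returns:
--         解析后的时间线项目列表
--     """
--     items: List[Dict[str, str]] = []
--     current_item: Dict[str, str] = {}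
--     known_keys = {"line", "date", "regimen", "response", "type", "note"}
--
--     for raw_line in content.split('\n'):
--         stripped = raw_line.strip()
--         if not stripped:
--             continue
--
--         # 新条目起始: "- key: value"
--         if stripped.startswith('- '):
--             if current_item:
--                 items.append(current_item)
--             current_item = {}
--             stripped = stripped[2:].strip()  # 去掉 "- "
--
--         # 解析 "key: value"（用 partition 处理值中包含冒号的情况）
--         if ':' in stripped:
--             key, _, value = stripped.partition(':')
--             key = key.strip().lower()
--             value = value.strip()
--             if key in known_keys:
--                 # 处理 yaml 特殊值：裸横杠 "-" 表示无数据
--                 if value == '-':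
--                     value = '-'
--                 current_item[key] = value
--
--     # 最后一个条目
--     if current_item:
--         items.append(current_item)
--
--     return items
-- ===== SOURCE B (Python) =====
-- from typing import Dict, List
--
-- def _parse_timeline_items(content: str) -> List[Dict[str, str]]:
--     known_keys = {"line", "date", "regimen", "response", "type", "note"}
--
--     # Pass 1: segment stripped non-blank lines into groups; a line starting
--     # with '- ' opens a new group (with its '- ' prefix removed).
--     groups: List[List[str]] = [[]]
--     for raw_line in content.split('\n'):
--         stripped = raw_line.strip()
--         if not stripped:
--             continue
--         if stripped.startswith('- '):
--             groups.append([stripped[2:].strip()])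
--         else:
--             groups[-1].append(stripped)
--
--     # Pass 2: parse each group into a dict; keep only non-empty dicts.
--     items: List[Dict[str, str]] = []
--     for group in groups:
--         item: Dict[str, str] = {}
--         for line in group:
--             if ':' in line:
--                 key, _, value = line.partition(':')
--                 key = key.strip().lower()
--                 if key in known_keys:
--                     item[key] = value.strip()
--         if item:
--             items.append(item)
--     return items
-- ===== Notes on version B (the rewrite author's own statement) =====
-- stated objective: alternative
-- what changed: Replaces A's single stateful loop (flush-current-item-on-'- ') with two distinct passes: first segment the stripped lines into groups at each '- ' line, then parse each group into a dict and keep the non-empty ones.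
import Mathlib
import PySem

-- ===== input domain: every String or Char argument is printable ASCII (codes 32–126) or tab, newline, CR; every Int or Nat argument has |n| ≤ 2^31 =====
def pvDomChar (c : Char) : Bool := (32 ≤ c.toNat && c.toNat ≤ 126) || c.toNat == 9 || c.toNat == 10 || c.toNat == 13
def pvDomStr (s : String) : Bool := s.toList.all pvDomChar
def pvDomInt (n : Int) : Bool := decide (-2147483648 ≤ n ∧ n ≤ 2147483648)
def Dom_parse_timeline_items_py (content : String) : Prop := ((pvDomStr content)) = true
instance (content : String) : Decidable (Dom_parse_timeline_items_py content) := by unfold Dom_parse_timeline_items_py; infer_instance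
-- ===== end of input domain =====

-- B re-parses the same format by a different decomposition (segment lines into groups,
-- then parse each group); same cost, objective: alternative. Return values only (no mutation).

-- ===== PORT A =====
-- shared by both ports: the known key set and the literal "key: value" parsing code
-- (identical source lines in both Pythons; ':' partition ported by hand via Chars.find — exact,
-- since it is guarded by ':' ∈ line so find ≥ 0 points at the first ':').
def pvKnownKeys : List (List Char) :=
  ["line".toList, "date".toList, "regimen".toList, "response".toList, "type".toList, "note".toList]

def pvParseLine (d : PySem.Dict String String) (s : List Char) : PySem.Dict String String :=
  if PySem.Chars.isIn [':'] s then
    let i := (PySem.Chars.find s [':']).toNat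
    let key := PySem.Chars.lower (PySem.Chars.strip (s.take i))
    let value := PySem.Chars.strip (s.drop (i + 1))
    if pvKnownKeys.contains key then
      -- the Python's "if value == '-': value = '-'" is a no-op; ported as nothing
      d.insert (String.ofList key) (String.ofList value)
    else d
  else d

-- one iteration of A's single loop: state = (items so far, current_item)
def pvStepA (st : List (PySem.Dict String String) × PySem.Dict String String) (raw : List Char) :
    List (PySem.Dict String String) × PySem.Dict String String :=
  let s := PySem.Chars.strip raw
  if s = [] then st
  else if PySem.Chars.startswith s ['-', ' '] then
    let items := if st.2.items = [] then st.1 else st.1 ++ [st.2]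
    (items, pvParseLine PySem.Dict.empty (PySem.Chars.strip (s.drop 2)))
  else (st.1, pvParseLine st.2 s)

def parse_timeline_items_py (content : String) : List (List (String × String)) :=
  let st := (PySem.Chars.splitOn content.toList ['\n']).foldl pvStepA ([], PySem.Dict.empty)
  let items := if st.2.items = [] then st.1 else st.1 ++ [st.2]
  items.map (·.items)

-- ===== PORT B =====
-- pass 1 of Source B: state = (finished groups, current last group)
def pvStepB (st : List (List (List Char)) × List (List Char)) (raw : List Char) :
    List (List (List Char)) × List (List Char) :=
  let s := PySem.Chars.strip raw
  if s = [] then st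
  else if PySem.Chars.startswith s ['-', ' '] then
    (st.1 ++ [st.2], [PySem.Chars.strip (s.drop 2)])
  else (st.1, st.2 ++ [s])

-- pass 2 of Source B: parse one group into a dict
def pvGroupDict (g : List (List Char)) : PySem.Dict String String :=
  g.foldl pvParseLine PySem.Dict.empty

def parse_timeline_items_py_alt (content : String) : List (List (String × String)) :=
  let st := (PySem.Chars.splitOn content.toList ['\n']).foldl pvStepB ([], [])
  let groups := st.1 ++ [st.2]
  let items := groups.foldl
    (fun acc g => let d := pvGroupDict g; if d.items = [] then acc else acc ++ [d]) []
  items.map (·.items)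

-- ===== PRECONDITION & SPEC =====
def Spec_parse_timeline_items_py (content : String) (out : List (List (String × String))) : Prop := out = parse_timeline_items_py_alt content
instance (content : String) (out : List (List (String × String))) : Decidable (Spec_parse_timeline_items_py content out) := by unfold Spec_parse_timeline_items_py; infer_instance

-- ===== CLAIM (what is proved, stated in full; the proofs are below) =====
def Claim_equal_parse_timeline_items_py : Prop := ∀ (content : String), Dom_parse_timeline_items_py content → Spec_parse_timeline_items_py content (parse_timeline_items_py content)

-- ===== LEMMAS AND PROOFS =====

-- the common recursive shape: the items still to be produced from lines ls with current dict cur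
def pvRest (ls : List (List Char)) (cur : PySem.Dict String String) :
    List (PySem.Dict String String) :=
  match ls with
  | [] => if cur.items = [] then [] else [cur]
  | r :: ls =>
    let s := PySem.Chars.strip r
    if s = [] then pvRest ls cur
    else if PySem.Chars.startswith s ['-', ' '] then
      (if cur.items = [] then [] else [cur]) ++
        pvRest ls (pvParseLine PySem.Dict.empty (PySem.Chars.strip (s.drop 2)))
    else pvRest ls (pvParseLine cur s)

def pvFlush (d : PySem.Dict String String) : List (PySem.Dict String String) :=
  if d.items = [] then [] else [d]

-- A's trailing "append the last item" step
def pvFinishA (st : List (PySem.Dict String String) × PySem.Dict String String) :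
    List (PySem.Dict String String) :=
  if st.2.items = [] then st.1 else st.1 ++ [st.2]

-- B's pass-2 result on the groups produced by pass 1, in flatMap form
def pvFinishB (st : List (List (List Char)) × List (List Char)) :
    List (PySem.Dict String String) :=
  (st.1 ++ [st.2]).flatMap (fun g => pvFlush (pvGroupDict g))

theorem pvA_rest (ls : List (List Char)) (items : List (PySem.Dict String String))
    (cur : PySem.Dict String String) :
    pvFinishA (ls.foldl pvStepA (items, cur)) = items ++ pvRest ls cur := by
  induction ls generalizing items cur with
  | nil =>
    simp only [List.foldl, pvRest, pvFinishA]
    split_ifs <;> simp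
  | cons r ls ih =>
    simp only [List.foldl, pvStepA, pvRest]
    split_ifs with h1 h2 h3
    · exact ih items cur
    · rw [ih]; simp
    · rw [ih]; simp
    · exact ih items _

theorem pvB_rest (ls : List (List Char)) (done : List (List (List Char)))
    (g : List (List Char)) :
    pvFinishB (ls.foldl pvStepB (done, g))
      = done.flatMap (fun g => pvFlush (pvGroupDict g)) ++ pvRest ls (pvGroupDict g) := by
  induction ls generalizing done g with
  | nil => simp [pvFinishB, pvRest, pvFlush]
  | cons r ls ih =>
    simp only [List.foldl, pvStepB, pvRest]
    split_ifs with h1 h2 h3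
    · exact ih done g
    · rw [ih (done ++ [g])]
      simp only [pvGroupDict] at h3 ⊢
      simp [pvFlush, h3]
    · rw [ih (done ++ [g])]
      simp only [pvGroupDict] at h3 ⊢
      simp [pvFlush, h3]
    · rw [ih done (g ++ [PySem.Chars.strip r])]
      simp [pvGroupDict]

-- ===== VERDICT (by name: the statement is the Claim_ definition above) =====
theorem parse_timeline_items_py_spec : Claim_equal_parse_timeline_items_py := by
  intro content _
  show _ = _
  unfold parse_timeline_items_py parse_timeline_items_py_alt
  dsimp only
  have hA := pvA_rest (PySem.Chars.splitOn content.toList ['\n']) [] PySem.Dict.empty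
  have hB := pvB_rest (PySem.Chars.splitOn content.toList ['\n']) [] []
  simp only [pvFinishA, pvFinishB, List.flatMap_nil, List.nil_append] at hA hB
  rw [hA]
  rw [show (fun (acc : List (PySem.Dict String String)) (g : List (List Char)) =>
        let d := pvGroupDict g; if d.items = [] then acc else acc ++ [d])
      = (fun acc g => acc ++ pvFlush (pvGroupDict g)) from by
        funext acc g; simp only [pvFlush]; split_ifs <;> simp,
    PySem.List.foldl_append_eq_flatMap]
  rw [List.nil_append, hB]
  rfl
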